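-- pv_equiv track=rewrite | github.com/datasets/economic-history | millennium-macroeconomic-data-uk/process.py | fill_forward
-- ===== SOURCE A (Python) =====
-- def fill_forward(section_row, total_cols):
--     """
--     Given a row of section header values (sparse), fill-forward sections
--     so every column index maps to a section name.
--     """
--     sections = {}
--     current = "General"
--     for j in range(total_cols):
--         v = section_row[j] if j < len(section_row) else None
--         if v and str(v).strip() not in ("", "Section", "Back to front page"):
--             current = str(v).strip()
--         sections[j] = current
--     return sections
-- ===== SOURCE B (Python) =====
-- def fill_forward(section_row, total_cols):
--     """
--     Given a row of section header values (sparse), fill-forward sections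
--     so every column index maps to a section name.
--     Two-pass: collect anchor columns, then fill contiguous segments.
--     """
--     anchors = [(0, "General")]
--     for j in range(min(len(section_row), total_cols)):
--         v = section_row[j]
--         if v and str(v).strip() not in ("", "Section", "Back to front page"):
--             anchors.append((j, str(v).strip()))
--     sections = {}
--     k = 0
--     while k < len(anchors):
--         start, name = anchors[k]
--         nxt = anchors[k + 1][0] if k + 1 < len(anchors) else total_cols
--         for j in range(start, nxt):
--             sections[j] = name
--         k += 1
--     return sections
-- ===== Notes on version B (the rewrite author's own statement) =====
-- stated objective: alternative
-- what changed: Replaces the single column-by-column pass carrying a running 'current' section with a two-pass anchor/segment algorithm: first collect the columns where a real header appears (plus an implicit (0,'General') anchor), then fill the dict segment-by-segment between consecutive anchors.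
import Mathlib
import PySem

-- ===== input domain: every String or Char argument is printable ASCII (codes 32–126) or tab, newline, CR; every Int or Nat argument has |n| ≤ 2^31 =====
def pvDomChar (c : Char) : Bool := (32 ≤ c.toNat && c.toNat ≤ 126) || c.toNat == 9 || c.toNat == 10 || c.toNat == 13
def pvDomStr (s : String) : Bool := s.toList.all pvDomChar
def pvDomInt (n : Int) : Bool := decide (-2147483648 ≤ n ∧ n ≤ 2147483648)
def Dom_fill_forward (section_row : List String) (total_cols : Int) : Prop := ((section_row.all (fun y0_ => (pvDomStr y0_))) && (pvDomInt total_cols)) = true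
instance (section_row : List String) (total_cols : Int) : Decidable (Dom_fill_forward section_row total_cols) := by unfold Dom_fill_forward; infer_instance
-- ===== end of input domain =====

-- B replaces A's single pass with a running current by a two-pass anchors-then-segment-fill of the dict (alternative decomposition, same cost).

-- ===== PORT A =====
-- one loop step of A: read column j (None beyond the row), update 'current' on a real header, store sections[j] = current
def ffStepA (section_row : List String) (st : PySem.Dict Int String × String) (j : Int) : PySem.Dict Int String × String :=
  let v : Option String := if j < PySem.List.len section_row then some (PySem.List.pyGetD section_row j "") else none
  let current : String :=
    match v with
    | none => st.2
    | some s =>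
        if s ≠ "" && !(PySem.Str.strip s == "" || PySem.Str.strip s == "Section" || PySem.Str.strip s == "Back to front page")
        then PySem.Str.strip s else st.2
  (st.1.insert j current, current)

def fill_forward (section_row : List String) (total_cols : Int) : List (Int × String) :=
  (((PySem.List.pyRange 0 total_cols 1).foldl (ffStepA section_row) (PySem.Dict.empty, "General")).1).items

-- ===== PORT B =====
-- anchor collection step: append (j, stripped header) when column j carries a real header
def ffStepAnc (section_row : List String) (acc : List (Int × String)) (j : Int) : List (Int × String) :=
  let v := PySem.List.pyGetD section_row j ""
  if v ≠ "" && !(PySem.Str.strip v == "" || PySem.Str.strip v == "Section" || PySem.Str.strip v == "Back to front page")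
  then acc ++ [(j, PySem.Str.strip v)] else acc

-- the while loop over anchors: fill sections[j] = name for j in [start, next anchor start or total_cols)
def ffFillSegs (total_cols : Int) : List (Int × String) → PySem.Dict Int String → PySem.Dict Int String
  | [], d => d
  | (start, name) :: rest, d =>
      let nxt : Int := match rest with | (b, _) :: _ => b | [] => total_cols
      ffFillSegs total_cols rest ((PySem.List.pyRange start nxt 1).foldl (fun d j => d.insert j name) d)

def fill_forward_alt (section_row : List String) (total_cols : Int) : List (Int × String) :=
  let anchors := (PySem.List.pyRange 0 (min (PySem.List.len section_row) total_cols) 1).foldl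
    (ffStepAnc section_row) [((0 : Int), "General")]
  (ffFillSegs total_cols anchors PySem.Dict.empty).items

-- ===== PRECONDITION & SPEC =====
def Spec_fill_forward (section_row : List String) (total_cols : Int) (out : List (Int × String)) : Prop := out = fill_forward_alt section_row total_cols
instance (section_row : List String) (total_cols : Int) (out : List (Int × String)) : Decidable (Spec_fill_forward section_row total_cols out) := by unfold Spec_fill_forward; infer_instance

-- ===== CLAIM (what is proved, stated in full; the proofs are below) =====
def Claim_equal_fill_forward : Prop := ∀ (section_row : List String) (total_cols : Int), Dom_fill_forward section_row total_cols → Spec_fill_forward section_row total_cols (fill_forward section_row total_cols)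

-- ===== LEMMAS AND PROOFS =====

-- the header guard both programs apply to a cell value
def ffHdr (s : String) : Option String :=
  if s ≠ "" && !(PySem.Str.strip s == "" || PySem.Str.strip s == "Section" || PySem.Str.strip s == "Back to front page")
  then some (PySem.Str.strip s) else none

-- header at column j, none beyond the row
def ffG (row : List String) (j : Int) : Option String :=
  if 0 ≤ j ∧ j < PySem.List.len row then ffHdr (PySem.List.pyGetD row j "") else none

-- reference output: pairs (j, current) for k columns starting at a with incoming current c
def ffRef (row : List String) : Int → Nat → String → List (Int × String)
  | _, 0, _ => []
  | a, k+1, c => let c' := (ffG row a).getD c; (a, c') :: ffRef row (a+1) k c'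

-- the running current after those k columns
def ffCur (row : List String) : Int → Nat → String → String
  | _, 0, c => c
  | a, k+1, c => ffCur row (a+1) k ((ffG row a).getD c)

-- anchors collected from k columns starting at a
def ffAnc (row : List String) : Int → Nat → List (Int × String)
  | _, 0 => []
  | a, k+1 => match ffG row a with
      | some s => (a, s) :: ffAnc row (a+1) k
      | none => ffAnc row (a+1) k

theorem ffRef_split (row : List String) (k1 k2 : Nat) : ∀ (a : Int) (c : String),
    ffRef row a (k1 + k2) c = ffRef row a k1 c ++ ffRef row (a + k1) k2 (ffCur row a k1 c) := by
  induction k1 with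
  | zero => intro a c; simp [ffRef, ffCur]
  | succ k ih =>
      intro a c
      have h1 : k + 1 + k2 = (k + k2) + 1 := by omega
      rw [h1]
      simp only [ffRef, ffCur]
      rw [ih (a+1)]
      have h2 : a + ((k : Int) + 1) = a + 1 + k := by ring
      simp [h2]

theorem ffCur_const (row : List String) : ∀ (k : Nat) (a : Int) (c : String),
    (ffG row a = none ∨ ffG row a = some c) →
    (∀ i : Int, a < i → i < a + k → ffG row i = none) →
    ffCur row a k c = c := by
  intro k
  induction k with
  | zero => intro a c _ _; rfl
  | succ k ih =>
      intro a c hc hgap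
      have hc' : (ffG row a).getD c = c := by rcases hc with h | h <;> simp [h]
      simp only [ffCur, hc']
      cases k with
      | zero => rfl
      | succ k' =>
          exact ih (a+1) c
            (Or.inl (hgap (a+1) (by omega) (by push_cast; omega)))
            (fun i h1 h2 => hgap i (by omega) (by push_cast at h2 ⊢; omega))

theorem ffRef_const (row : List String) : ∀ (k : Nat) (a : Int) (c : String),
    (ffG row a = none ∨ ffG row a = some c) →
    (∀ i : Int, a < i → i < a + k → ffG row i = none) →
    ffRef row a k c = (PySem.List.pyRange a (a + k) 1).map (fun j => (j, c)) := by
  intro k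
  induction k with
  | zero => intro a c _ _; simp [ffRef, PySem.List.pyRange_one_eq_nil]
  | succ k ih =>
      intro a c hc hgap
      have hc' : (ffG row a).getD c = c := by rcases hc with h | h <;> simp [h]
      have hlt : a < a + ((k : Int) + 1) := by omega
      rw [PySem.List.pyRange_one_cons (by push_cast; omega)]
      simp only [ffRef, hc', List.map_cons]
      have hrec : ffRef row (a+1) k c = (PySem.List.pyRange (a+1) ((a+1) + k) 1).map (fun j => (j, c)) := by
        cases k with
        | zero => simp [ffRef, PySem.List.pyRange_one_eq_nil]
        | succ k' =>
            exact ih (a+1) c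
              (Or.inl (hgap (a+1) (by omega) (by push_cast; omega)))
              (fun i h1 h2 => hgap i (by omega) (by push_cast at h2 ⊢; omega))
      rw [hrec]
      have h2 : (a + 1) + (k : Int) = a + ((k : Nat) + 1 : Nat) := by push_cast; ring
      rw [h2]

theorem ffRef_absorb (row : List String) (a : Int) (s : String) (hg : ffG row a = some s) :
    ∀ (k : Nat) (c : String), ffRef row a k c = ffRef row a k s := by
  intro k c
  cases k with
  | zero => rfl
  | succ k => simp [ffRef, hg]

-- a dict whose keys are below b does not contain a ≥ b
theorem ffFresh (d : PySem.Dict Int String) (a b : Int) (hd : ∀ p ∈ d.items, p.1 < b) (hb : b ≤ a) :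
    d.contains a = false := by
  by_contra h
  have h1 : d.contains a = true := by simpa using h
  rw [PySem.Dict.contains_iff_mem_keys] at h1
  have h2 : a ∈ d.items.map (·.1) := h1
  obtain ⟨p, hp, hpa⟩ := List.mem_map.mp h2
  have := hd p hp
  omega

-- one step of A's loop updates current by the header and stores it
theorem ffStepA_eq (row : List String) (d : PySem.Dict Int String) (c : String) (a : Int) (ha : 0 ≤ a) :
    ffStepA row (d, c) a = (d.insert a ((ffG row a).getD c), (ffG row a).getD c) := by
  simp only [ffStepA, ffG]
  by_cases hlt : a < PySem.List.len row
  · rw [if_pos hlt, if_pos ⟨ha, hlt⟩]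
    simp only [ffHdr]
    split_ifs with h <;> simp
  · rw [if_neg hlt, if_neg (by tauto)]
    simp

-- A's loop: the dict accumulates the reference pairs, the second component is the running current
theorem ffA_loop (row : List String) : ∀ (k : Nat) (a : Int) (c : String) (d : PySem.Dict Int String),
    0 ≤ a → (∀ p ∈ d.items, p.1 < a) →
    ((PySem.List.pyRange a (a + k) 1).foldl (ffStepA row) (d, c)).1.items = d.items ++ ffRef row a k c ∧
    ((PySem.List.pyRange a (a + k) 1).foldl (ffStepA row) (d, c)).2 = ffCur row a k c := by
  intro k
  induction k with
  | zero =>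
      intro a c d ha hd
      simp [PySem.List.pyRange_one_eq_nil, ffRef, ffCur]
  | succ k ih =>
      intro a c d ha hd
      rw [PySem.List.pyRange_one_cons (by push_cast; omega)]
      simp only [List.foldl_cons]
      rw [ffStepA_eq row d c a ha]
      have hfresh : d.contains a = false := ffFresh d a a hd le_rfl
      have hins : (d.insert a ((ffG row a).getD c)).items = d.items ++ [(a, (ffG row a).getD c)] :=
        PySem.Dict.items_insert_of_not_contains d _ hfresh
      have hd' : ∀ p ∈ (d.insert a ((ffG row a).getD c)).items, p.1 < a + 1 := by
        intro p hp
        rw [hins] at hp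
        rcases List.mem_append.mp hp with h | h
        · have := hd p h; omega
        · rw [List.mem_singleton] at h
          subst h
          show a < a + 1
          omega
      have harr : a + ((k : Nat) + 1 : Nat) = (a + 1) + (k : Nat) := by push_cast; ring
      rw [harr]
      obtain ⟨h1, h2⟩ := ih (a+1) ((ffG row a).getD c) _ (by omega) hd'
      refine ⟨?_, ?_⟩
      · rw [h1, hins]
        simp [ffRef]
      · rw [h2]
        rfl

-- one step of B's anchor loop appends the anchor iff the header fires (inside the row)
theorem ffStepAnc_eq (row : List String) (acc : List (Int × String)) (a : Int)
    (ha : 0 ≤ a) (hlt : a < PySem.List.len row) :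
    ffStepAnc row acc a = (match ffG row a with
      | some s => acc ++ [(a, s)]
      | none => acc) := by
  rw [ffG, if_pos ⟨ha, hlt⟩]
  simp only [ffStepAnc, ffHdr]
  split_ifs with h <;> simp

-- B's anchor loop computes ffAnc
theorem ffAnc_loop (row : List String) : ∀ (k : Nat) (a : Int) (acc : List (Int × String)),
    0 ≤ a → a + k ≤ PySem.List.len row →
    (PySem.List.pyRange a (a + k) 1).foldl (ffStepAnc row) acc = acc ++ ffAnc row a k := by
  intro k
  induction k with
  | zero =>
      intro a acc ha hlen
      simp [PySem.List.pyRange_one_eq_nil, ffAnc]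
  | succ k ih =>
      intro a acc ha hlen
      rw [PySem.List.pyRange_one_cons (by push_cast; omega)]
      simp only [List.foldl_cons]
      rw [ffStepAnc_eq row acc a ha (by push_cast at hlen; omega)]
      have harr : a + ((k : Nat) + 1 : Nat) = (a + 1) + (k : Nat) := by push_cast; ring
      rw [harr]
      cases hg : ffG row a with
      | none =>
          simp only [ffAnc, hg]
          exact ih (a+1) acc (by omega) (by push_cast at hlen ⊢; omega)
      | some s =>
          simp only [ffAnc, hg]
          rw [ih (a+1) (acc ++ [(a, s)]) (by omega) (by push_cast at hlen ⊢; omega)]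
          simp

-- a constant fill over [a0, b) appends fresh keys
theorem ffFill_const (a0 b : Int) (c : String) (d : PySem.Dict Int String)
    (hd : ∀ p ∈ d.items, p.1 < a0) :
    ((PySem.List.pyRange a0 b 1).foldl (fun d j => d.insert j c) d).items
      = d.items ++ (PySem.List.pyRange a0 b 1).map (fun j => (j, c)) := by
  have := PySem.Dict.items_foldl_insert_fresh (PySem.List.pyRange a0 b 1) (fun j => j) (fun _ => c) d
    (by
      intro x hx
      rw [PySem.List.mem_pyRange_one] at hx
      exact ffFresh d x a0 hd hx.1)
    (by simpa using PySem.List.nodup_pyRange_one a0 b)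
  simpa using this

-- B's segment fill of the anchors produces the reference pairs
theorem ffFill_main (row : List String) (n : Int) : ∀ (k : Nat) (a a0 : Int) (c : String) (d : PySem.Dict Int String),
    0 ≤ a0 → a0 ≤ a → a + k ≤ n →
    (a0 < n → ffG row a0 = none ∨ ffG row a0 = some c) →
    (∀ i : Int, a0 < i → i < a → ffG row i = none) →
    (∀ i : Int, a + k ≤ i → i < n → ffG row i = none) →
    (∀ p ∈ d.items, p.1 < a0) →
    (ffFillSegs n ((a0, c) :: ffAnc row a k) d).items = d.items ++ ffRef row a0 (n - a0).toNat c := by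
  intro k
  induction k with
  | zero =>
      intro a a0 c d h0 h0a hkn hc hgap htail hd
      simp only [ffAnc, ffFillSegs]
      rw [ffFill_const a0 n c d hd]
      congr 1
      by_cases hn : a0 < n
      · have heq : a0 + (((n - a0).toNat : Nat) : Int) = n := by omega
        rw [ffRef_const row (n - a0).toNat a0 c (hc hn)
              (fun i h1 h2 => by
                rcases lt_or_ge i a with hia | hia
                · exact hgap i h1 hia
                · exact htail i (by push_cast at hkn ⊢; omega) (by omega)), heq]
      · have h1 : (n - a0).toNat = 0 := by omega
        rw [h1]
        simp [ffRef, PySem.List.pyRange_one_eq_nil (by omega : n ≤ a0)]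
  | succ k ih =>
      intro a a0 c d h0 h0a hkn hc hgap htail hd
      cases hg : ffG row a with
      | none =>
          simp only [ffAnc, hg]
          exact ih (a+1) a0 c d h0 (by omega) (by push_cast at hkn ⊢; omega) hc
            (fun i h1 h2 => by
              rcases lt_or_eq_of_le (by omega : i ≤ a) with hia | hia
              · exact hgap i h1 hia
              · rw [hia]; exact hg)
            (fun i hi h2 => htail i (by push_cast at hi ⊢; omega) h2) hd
      | some s =>
          simp only [ffAnc, hg]
          rw [show ffFillSegs n ((a0, c) :: (a, s) :: ffAnc row (a + 1) k) d
                = ffFillSegs n ((a, s) :: ffAnc row (a + 1) k)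
                    ((PySem.List.pyRange a0 a 1).foldl (fun d j => d.insert j c) d) from rfl]
          have ha_lt_n : a < n := by push_cast at hkn; omega
          have hd'items : ((PySem.List.pyRange a0 a 1).foldl (fun d j => d.insert j c) d).items
              = d.items ++ (PySem.List.pyRange a0 a 1).map (fun j => (j, c)) := ffFill_const a0 a c d hd
          have hd'keys : ∀ p ∈ ((PySem.List.pyRange a0 a 1).foldl (fun d j => d.insert j c) d).items, p.1 < a := by
            intro p hp; rw [hd'items] at hp
            rcases List.mem_append.mp hp with h | h
            · have := hd p h; omega
            · obtain ⟨j, hj, rfl⟩ := List.mem_map.mp h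
              rw [PySem.List.mem_pyRange_one] at hj
              simpa using hj.2
          have hrec := ih (a+1) a s _ (by omega) (by omega) (by push_cast at hkn ⊢; omega)
            (fun _ => Or.inr hg)
            (fun i h1 h2 => absurd h2 (by omega))
            (fun i hi h2 => htail i (by push_cast at hi ⊢; omega) h2) hd'keys
          rw [hrec, hd'items]
          have hsplit : (n - a0).toNat = (a - a0).toNat + (n - a).toNat := by omega
          have haa : a0 + (((a - a0).toNat : Nat) : Int) = a := by omega
          rw [hsplit, ffRef_split, haa]
          have hcur : ffCur row a0 (a - a0).toNat c = c :=
            ffCur_const row (a - a0).toNat a0 c (hc (by omega))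
              (fun i h1 h2 => hgap i h1 (by omega))
          rw [hcur, ffRef_absorb row a s hg (n - a).toNat c,
              ffRef_const row (a - a0).toNat a0 c (hc (by omega)) (fun i h1 h2 => hgap i h1 (by omega)),
              haa]
          simp

-- the range [0, n) is the range [0, ↑n.toNat)
theorem ffRange_toNat (n : Int) : PySem.List.pyRange 0 n 1 = PySem.List.pyRange 0 (0 + (n.toNat : Int)) 1 := by
  rw [PySem.List.pyRange_one, PySem.List.pyRange_one]
  congr 2
  omega

theorem ffEmpty_keys : ∀ p ∈ (PySem.Dict.empty : PySem.Dict Int String).items, p.1 < 0 := by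
  intro p hp
  simp only [show (PySem.Dict.empty : PySem.Dict Int String).items = [] from rfl] at hp
  cases hp

theorem ffLen_eq (row : List String) : PySem.List.len row = (row.length : Int) := by
  simp [pysem]

-- columns at or beyond the row carry no header
theorem ffG_none_of_ge (row : List String) (i : Int) (hi : PySem.List.len row ≤ i) : ffG row i = none := by
  rw [ffG, if_neg (by omega)]

-- A's program computes the reference list
theorem ffA_eq (row : List String) (n : Int) : fill_forward row n = ffRef row 0 n.toNat "General" := by
  unfold fill_forward
  rw [ffRange_toNat n]
  rw [(ffA_loop row n.toNat 0 "General" PySem.Dict.empty le_rfl ffEmpty_keys).1]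
  simp only [show (PySem.Dict.empty : PySem.Dict Int String).items = [] from rfl, List.nil_append]

-- ===== VERDICT (by name: the statement is the Claim_ definition above) =====
theorem fill_forward_spec : Claim_equal_fill_forward := by
  intro row n _
  show fill_forward row n = fill_forward_alt row n
  rw [ffA_eq row n]
  unfold fill_forward_alt
  show ffRef row 0 n.toNat "General"
      = (ffFillSegs n ((PySem.List.pyRange 0 (min (PySem.List.len row) n) 1).foldl (ffStepAnc row)
          [((0 : Int), "General")]) PySem.Dict.empty).items
  have hlen : PySem.List.len row = (row.length : Int) := ffLen_eq row
  by_cases hn : 0 < n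
  · -- positive number of columns
    rw [ffRange_toNat (min (PySem.List.len row) n)]
    rw [ffAnc_loop row (min (PySem.List.len row) n).toNat 0 [((0 : Int), "General")] le_rfl
          (by omega)]
    rw [List.singleton_append]
    have htail : ∀ i : Int, (0 : Int) + ((min (PySem.List.len row) n).toNat : Int) ≤ i → i < n → ffG row i = none := by
      intro i hi h2
      exact ffG_none_of_ge row i (by omega)
    cases hg : ffG row 0 with
    | none =>
        rw [ffFill_main row n (min (PySem.List.len row) n).toNat 0 0 "General" PySem.Dict.empty
              le_rfl le_rfl (by omega) (fun _ => Or.inl hg)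
              (fun i h1 h2 => absurd h2 (by omega)) htail ffEmpty_keys]
        simp only [show (PySem.Dict.empty : PySem.Dict Int String).items = [] from rfl, List.nil_append]
        congr 1
        omega
    | some s =>
        have hlen0 : 0 < PySem.List.len row := by
          by_contra h
          rw [ffG, if_neg (by omega)] at hg
          cases hg
        have hmpos : 0 < min (PySem.List.len row) n := by omega
        obtain ⟨k', hk'⟩ : ∃ k', (min (PySem.List.len row) n).toNat = k' + 1 :=
          ⟨(min (PySem.List.len row) n).toNat - 1, by omega⟩
        rw [hk']
        simp only [ffAnc, hg]
        rw [show (ffFillSegs n ((0, "General") :: (0, s) :: ffAnc row (0 + 1) k') PySem.Dict.empty)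
              = ffFillSegs n ((0, s) :: ffAnc row (0 + 1) k')
                  ((PySem.List.pyRange 0 0 1).foldl (fun d j => d.insert j "General") PySem.Dict.empty) from rfl]
        rw [PySem.List.pyRange_one_eq_nil le_rfl, List.foldl_nil]
        rw [ffFill_main row n k' (0 + 1) 0 s PySem.Dict.empty le_rfl (by omega)
              (by push_cast; omega) (fun _ => Or.inr hg)
              (fun i h1 h2 => absurd h2 (by omega))
              (fun i hi h2 => ffG_none_of_ge row i (by push_cast at hi; omega)) ffEmpty_keys]
        simp only [show (PySem.Dict.empty : PySem.Dict Int String).items = [] from rfl, List.nil_append]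
        rw [ffRef_absorb row 0 s hg n.toNat "General"]
        congr 1
        omega
  · -- no columns: both sides are empty
    have hm : min (PySem.List.len row) n ≤ 0 := by omega
    rw [PySem.List.pyRange_one_eq_nil hm, List.foldl_nil]
    show ffRef row 0 n.toNat "General" = (ffFillSegs n [((0 : Int), "General")] PySem.Dict.empty).items
    rw [show (ffFillSegs n [((0 : Int), "General")] PySem.Dict.empty)
          = ffFillSegs n ([] : List (Int × String))
              ((PySem.List.pyRange 0 n 1).foldl (fun d j => d.insert j "General") PySem.Dict.empty) from rfl]
    rw [PySem.List.pyRange_one_eq_nil (by omega), List.foldl_nil]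
    rw [show n.toNat = 0 from by omega]
    rfl
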